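-- pv_equiv track=rewrite | github.com/gyasis/PromptChain | promptchain/utils/ephemeral_executor.py | _summarize_code_output
-- ===== SOURCE A (Python) =====
-- def _truncate_output(output: str, max_chars: int = 1000) -> str:
--     """Truncate output while preserving beginning and end.
--
--     Args:
--         output: Output to truncate
--         max_chars: Maximum characters to keep
--
--     Returns:
--         Truncated output with indicator
--     """
--     if len(output) <= max_chars:
--         return output
--
--     half = max_chars // 2
--     return f"{output[:half]}\n\n... [{len(output) - max_chars} chars truncated] ...\n\n{output[-half:]}"
--
-- def _summarize_code_output(output: str, code: str = "") -> str:
--     """Summarize code execution output.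
--
--     Args:
--         output: Raw execution output
--         code: Code that was executed
--
--     Returns:
--         Summarized output
--     """
--     lines = output.strip().split("\n") if output else []
--
--     # Check for errors
--     error_indicators = ["error", "exception", "traceback", "failed"]
--     has_error = any(ind in output.lower() for ind in error_indicators)
--
--     if has_error:
--         # Extract the error
--         error_lines = []
--         in_traceback = False
--         for line in lines:
--             if "traceback" in line.lower():
--                 in_traceback = True
--             if in_traceback:
--                 error_lines.append(line)
--             elif any(ind in line.lower() for ind in error_indicators):
--                 error_lines.append(line)
--
--         if error_lines:
--             return f"[FAILED] Code execution error:\n{chr(10).join(error_lines[-10:])}"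
--         else:
--             return f"[FAILED] Execution failed. Output:\n{_truncate_output(output, 500)}"
--
--     else:
--         # Success - summarize output
--         if len(output) < 500:
--             return f"[SUCCESS] Output:\n{output}"
--         else:
--             return f"[SUCCESS] Execution completed ({len(lines)} lines, {len(output)} chars):\n{_truncate_output(output, 400)}"
-- ===== SOURCE B (Python) =====
-- def _truncate_output(output: str, max_chars: int = 1000) -> str:
--     if len(output) <= max_chars:
--         return output
--     half = max_chars // 2
--     return f"{output[:half]}\n\n... [{len(output) - max_chars} chars truncated] ...\n\n{output[-half:]}"
--
--
-- def _summarize_code_output(output: str, code: str = "") -> str: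
--     lines = output.strip().split("\n") if output else []
--     error_indicators = ["error", "exception", "traceback", "failed"]
--     low = output.lower()
--
--     if not any(ind in low for ind in error_indicators):
--         # Success - summarize output
--         if len(output) < 500:
--             return f"[SUCCESS] Output:\n{output}"
--         return f"[SUCCESS] Execution completed ({len(lines)} lines, {len(output)} chars):\n{_truncate_output(output, 400)}"
--
--     # Error: locate the first traceback line, then slice instead of a stateful scan:
--     # indicator-bearing lines before it, everything from it on.
--     idx = next((i for i, l in enumerate(lines) if "traceback" in l.lower()), len(lines))
--     error_lines = [l for l in lines[:idx]
--                    if any(ind in l.lower() for ind in error_indicators)] + lines[idx:]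
--     if error_lines:
--         return f"[FAILED] Code execution error:\n" + "\n".join(error_lines[-10:])
--     return f"[FAILED] Execution failed. Output:\n{_truncate_output(output, 500)}"
-- ===== Notes on version B (the rewrite author's own statement) =====
-- stated objective: alternative
-- what changed: The error branch's stateful boolean-flag scan is replaced by an index-locate-then-slice decomposition: find the index of the first stack-trace marker line, then build the error list as a filter of the prefix plus the whole suffix.
import Mathlib
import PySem

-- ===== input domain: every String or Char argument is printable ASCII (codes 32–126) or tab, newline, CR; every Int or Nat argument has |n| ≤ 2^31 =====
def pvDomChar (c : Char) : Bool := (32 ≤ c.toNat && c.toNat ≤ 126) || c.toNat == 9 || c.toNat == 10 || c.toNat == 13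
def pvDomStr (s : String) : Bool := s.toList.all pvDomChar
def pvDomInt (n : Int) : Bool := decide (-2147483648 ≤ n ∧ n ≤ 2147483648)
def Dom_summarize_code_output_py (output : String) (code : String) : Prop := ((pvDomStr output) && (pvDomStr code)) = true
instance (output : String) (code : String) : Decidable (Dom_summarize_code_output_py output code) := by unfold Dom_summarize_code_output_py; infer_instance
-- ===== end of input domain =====

-- B replaces A's stateful in_traceback flag loop with an index-locate-then-slice decomposition
-- of the error-line extraction (objective: alternative; same cost).


-- shared literal context of both Pythons
def pvIndicators : List String := ["error", "exception", "traceback", "failed"]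

-- any(ind in line.lower() for ind in error_indicators)
def pvHasInd (line : String) : Bool :=
  pvIndicators.any (fun ind => PySem.Str.isIn ind (PySem.Str.lower line))

-- "traceback" in line.lower()
def pvIsTb (line : String) : Bool := PySem.Str.isIn "traceback" (PySem.Str.lower line)

-- _truncate_output (helper of both Pythons, verbatim)
def truncate_output_py (output : String) (max_chars : Int) : String :=
  if PySem.Str.len output ≤ max_chars then output
  else
    let half := PySem.Int.floordiv max_chars 2
    PySem.Str.join "" [PySem.Str.slice output none (some half),
      "\n\n... [", PySem.Int.toStr (PySem.Str.len output - max_chars),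
      " chars truncated] ...\n\n", PySem.Str.slice output (some (-half)) none]

-- ===== PORT A =====
-- the body of A's for-loop over lines, state = (error_lines, in_traceback)
def pvLoopA (st : List String × Bool) (line : String) : List String × Bool :=
  let in_tb := if pvIsTb line then true else st.2
  if in_tb then (st.1 ++ [line], in_tb)
  else if pvHasInd line then (st.1 ++ [line], in_tb)
  else (st.1, in_tb)

def summarize_code_output_py (output : String) (code : String) : String :=
  let lines : List String :=
    if output = "" then [] else (PySem.Str.split? (PySem.Str.strip output) "\n").getD []  -- sep "\n" ≠ "": split? is some
  let has_error := pvIndicators.any (fun ind => PySem.Str.isIn ind (PySem.Str.lower output))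
  if has_error then
    let error_lines := (lines.foldl pvLoopA ([], false)).1
    if error_lines ≠ [] then
      PySem.Str.join "" ["[FAILED] Code execution error:\n",
        PySem.Str.join "\n" (PySem.List.slice error_lines (some (-10)) none)]
    else
      PySem.Str.join "" ["[FAILED] Execution failed. Output:\n", truncate_output_py output 500]
  else
    if PySem.Str.len output < 500 then
      PySem.Str.join "" ["[SUCCESS] Output:\n", output]
    else
      PySem.Str.join "" ["[SUCCESS] Execution completed (", PySem.Int.toStr lines.length,
        " lines, ", PySem.Int.toStr (PySem.Str.len output), " chars):\n",
        truncate_output_py output 400]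

-- ===== PORT B =====
def summarize_code_output_py_alt (output : String) (code : String) : String :=
  let lines : List String :=
    if output = "" then [] else (PySem.Str.split? (PySem.Str.strip output) "\n").getD []  -- sep "\n" ≠ "": split? is some
  if ¬ (pvIndicators.any (fun ind => PySem.Str.isIn ind (PySem.Str.lower output))) then
    -- success branch first (Source B's early return)
    if PySem.Str.len output < 500 then
      PySem.Str.join "" ["[SUCCESS] Output:\n", output]
    else
      PySem.Str.join "" ["[SUCCESS] Execution completed (", PySem.Int.toStr lines.length,
        " lines, ", PySem.Int.toStr (PySem.Str.len output), " chars):\n",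
        truncate_output_py output 400]
  else
    -- idx = first traceback line (len(lines) when none): List.findIdx is exactly that default
    let idx := lines.findIdx pvIsTb
    -- lines[:idx] / lines[idx:] with 0 ≤ idx ≤ len are take/drop
    let error_lines := (lines.take idx).filter pvHasInd ++ lines.drop idx
    if error_lines ≠ [] then
      PySem.Str.join "" ["[FAILED] Code execution error:\n",
        PySem.Str.join "\n" (PySem.List.slice error_lines (some (-10)) none)]
    else
      PySem.Str.join "" ["[FAILED] Execution failed. Output:\n", truncate_output_py output 500]

-- ===== PRECONDITION & SPEC =====
def Spec_summarize_code_output_py (output : String) (code : String) (out : String) : Prop := out = summarize_code_output_py_alt output code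
instance (output : String) (code : String) (out : String) : Decidable (Spec_summarize_code_output_py output code out) := by unfold Spec_summarize_code_output_py; infer_instance

-- ===== CLAIM (what is proved, stated in full; the proofs are below) =====
def Claim_equal_summarize_code_output_py : Prop := ∀ (output : String) (code : String), Dom_summarize_code_output_py output code → Spec_summarize_code_output_py output code (summarize_code_output_py output code)

-- ===== LEMMAS AND PROOFS =====

-- once in_traceback is true, A's loop appends every remaining line
theorem pvLoopA_true (lines : List String) (acc : List String) :
    lines.foldl pvLoopA (acc, true) = (acc ++ lines, true) := by
  induction lines generalizing acc with
  | nil => simp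
  | cons l ls ih =>
    simp only [List.foldl_cons, pvLoopA]
    split <;> simp [ih]

-- with the flag still false, A's loop computes B's filter-prefix ++ suffix at the first traceback line
theorem pvLoopA_false (lines : List String) (acc : List String) :
    (lines.foldl pvLoopA (acc, false)).1 =
      acc ++ ((lines.take (lines.findIdx pvIsTb)).filter pvHasInd ++ lines.drop (lines.findIdx pvIsTb)) := by
  induction lines generalizing acc with
  | nil => simp
  | cons l ls ih =>
    by_cases h : pvIsTb l = true
    · simp only [List.foldl_cons, pvLoopA, h, if_true, List.findIdx_cons, cond_true]
      rw [pvLoopA_true]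
      simp
    · rw [Bool.not_eq_true] at h
      simp only [List.foldl_cons, pvLoopA, h, List.findIdx_cons, cond_false,
        Bool.false_eq_true, if_false]
      by_cases hq : pvHasInd l = true
      · rw [if_pos hq, ih]
        simp [hq]
      · rw [if_neg (by simp [hq]), ih]
        simp [hq]

-- ===== VERDICT (by name: the statement is the Claim_ definition above) =====
theorem summarize_code_output_py_spec : Claim_equal_summarize_code_output_py := by
  intro output code _
  unfold Spec_summarize_code_output_py summarize_code_output_py summarize_code_output_py_alt
  simp only []
  rw [pvLoopA_false]
  simp only [List.nil_append]
  by_cases he : (pvIndicators.any fun ind => PySem.Str.isIn ind (PySem.Str.lower output)) = true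
  · simp only [he, not_true_eq_false, if_true, if_false]
  · rw [Bool.not_eq_true] at he
    simp only [he, Bool.false_eq_true, not_false_eq_true, if_true, if_false]
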